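-- pv_equiv track=rewrite | github.com/stevecolby/advent-of-code-2020 | day11/day11.py | occupied_seat_found
-- ===== SOURCE A (Python) =====
-- def occupied_seat_found(x_change, y_change, x, y, lines):
--
--     if lines[x][y] == '#':
--         return True
--     elif lines[x][y] == 'L':
--         return False
--
--     if (y + y_change < len(lines[0]) and
--         y + y_change >= 0 and
--         x + x_change < len(lines) and
--         x + x_change >= 0):
--         check_seat =  occupied_seat_found(x_change, y_change, x + x_change, y + y_change, lines)
--         return check_seat
--     else:
--         return False
-- ===== SOURCE B (Python) =====
-- def occupied_seat_found(x_change, y_change, x, y, lines):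
--     c = lines[x][y]
--     if c == '#':
--         return True
--     if c == 'L':
--         return False
--     n, m = len(lines), len(lines[0])
--     cx, cy = x + x_change, y + y_change
--     if not (0 <= cy < m and 0 <= cx < n):
--         return False
--     # closed-form ray length: number of further steps that stay inside the box
--     steps = []
--     if x_change > 0:
--         steps.append((n - 1 - cx) // x_change)
--     elif x_change < 0:
--         steps.append(cx // -x_change)
--     if y_change > 0:
--         steps.append((m - 1 - cy) // y_change)
--     elif y_change < 0:
--         steps.append(cy // -y_change)
--     for _ in range(min(steps) + 1):
--         c = lines[cx][cy]
--         if c == '#':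
--             return True
--         if c == 'L':
--             return False
--         cx += x_change
--         cy += y_change
--     return False
-- ===== Notes on version B (the rewrite author's own statement) =====
-- stated objective: alternative
-- what changed: Replaces A's per-step bounds-checked recursion by a closed-form arithmetic computation of the ray length (min over the applicable axes of floor-divided slack) followed by a single check-free for-loop over that many cells.
-- outside the precondition, e.g. on occupied_seat_found(1, 0, 0, 0, ['.#', '..', '#']): A returns True, B returns True
import Mathlib
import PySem

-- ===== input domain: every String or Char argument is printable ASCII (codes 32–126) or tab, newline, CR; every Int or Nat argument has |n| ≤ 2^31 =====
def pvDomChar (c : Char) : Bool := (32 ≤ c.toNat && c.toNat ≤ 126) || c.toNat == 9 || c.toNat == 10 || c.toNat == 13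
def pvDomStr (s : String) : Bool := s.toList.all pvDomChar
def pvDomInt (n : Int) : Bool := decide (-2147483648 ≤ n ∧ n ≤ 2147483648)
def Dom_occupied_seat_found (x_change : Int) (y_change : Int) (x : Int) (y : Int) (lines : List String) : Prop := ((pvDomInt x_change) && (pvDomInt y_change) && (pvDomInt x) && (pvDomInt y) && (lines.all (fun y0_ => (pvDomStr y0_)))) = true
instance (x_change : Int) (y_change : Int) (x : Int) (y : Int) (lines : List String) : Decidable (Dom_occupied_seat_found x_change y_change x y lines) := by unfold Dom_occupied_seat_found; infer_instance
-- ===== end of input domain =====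

-- B replaces A's per-step bounds-checked recursion by a closed-form ray-length computation
-- followed by a check-free bounded scan (objective: alternative decomposition, same cost).


-- lines[x][y] as Python evaluates it (negative-index wraparound; none = IndexError); shared by both ports
def pvCell (lines : List String) (x y : Int) : Option Char :=
  (PySem.List.pyGet? lines x).bind (fun s => PySem.Str.pyGet? s y)

-- ===== PORT A =====
-- A's recursion, fueled; the fuel chosen at entry exceeds the path length on every input
-- admitted by Pre_ (proved below), so inside Pre_ this computes exactly what Python A computes.
def osfGo (x_change y_change : Int) (lines : List String) : Nat → Int → Int → Bool
  | 0, _, _ => false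
  | fuel + 1, x, y =>
    match pvCell lines x y with
    | none => false  -- IndexError; outside Pre_
    | some c =>
      if c = '#' then true
      else if c = 'L' then false
      else if y + y_change < ((lines.headD "").toList.length : Int) ∧
              0 ≤ y + y_change ∧
              x + x_change < (lines.length : Int) ∧
              0 ≤ x + x_change then
        osfGo x_change y_change lines fuel (x + x_change) (y + y_change)
      else false

def occupied_seat_found (x_change : Int) (y_change : Int) (x : Int) (y : Int) (lines : List String) : Bool :=
  osfGo x_change y_change lines (lines.length + (lines.headD "").toList.length + 2) x y

-- ===== PORT B =====
-- the list `steps` of Source B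
def raySteps (x_change y_change n m cx cy : Int) : List Int :=
  (if 0 < x_change then [PySem.Int.floordiv (n - 1 - cx) x_change]
   else if x_change < 0 then [PySem.Int.floordiv cx (-x_change)] else []) ++
  (if 0 < y_change then [PySem.Int.floordiv (m - 1 - cy) y_change]
   else if y_change < 0 then [PySem.Int.floordiv cy (-y_change)] else [])

-- the `for _ in range(min(steps)+1)` loop of Source B: scan that many cells, no bounds checks
def scanRay (x_change y_change : Int) (lines : List String) : Nat → Int → Int → Bool
  | 0, _, _ => false
  | t + 1, cx, cy =>
    match pvCell lines cx cy with
    | none => false  -- IndexError; outside Pre_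
    | some c =>
      if c = '#' then true
      else if c = 'L' then false
      else scanRay x_change y_change lines t (cx + x_change) (cy + y_change)

def occupied_seat_found_alt (x_change : Int) (y_change : Int) (x : Int) (y : Int) (lines : List String) : Bool :=
  match pvCell lines x y with
  | none => false  -- IndexError; outside Pre_
  | some c =>
    if c = '#' then true
    else if c = 'L' then false
    else
      let n : Int := lines.length
      let m : Int := (lines.headD "").toList.length
      let cx := x + x_change
      let cy := y + y_change
      if 0 ≤ cy ∧ cy < m ∧ 0 ≤ cx ∧ cx < n then
        match PySem.List.min? (raySteps x_change y_change n m cx cy) (fun k => k) with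
        | none => false  -- min() of an empty list (ValueError); outside Pre_
        | some kmax => scanRay x_change y_change lines (kmax + 1).toNat cx cy
      else false

-- ===== PRECONDITION & SPEC =====
-- Pre_ excludes inputs where the first access lines[x][y] raises IndexError; and, when a walk
-- actually starts (first cell is floor and the first step stays in bounds), it excludes the
-- zero step vector (A recurses forever there) and ragged grids with a row shorter than row 0
-- (on which A may raise IndexError mid-walk, or returns only because its accidental path
-- missed the short row).
def Pre_occupied_seat_found (x_change : Int) (y_change : Int) (x : Int) (y : Int) (lines : List String) : Prop :=
  (pvCell lines x y).isSome = true ∧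
  ((pvCell lines x y ≠ some '#' ∧ pvCell lines x y ≠ some 'L' ∧
    0 ≤ y + y_change ∧ y + y_change < ((lines.headD "").toList.length : Int) ∧
    0 ≤ x + x_change ∧ x + x_change < (lines.length : Int)) →
   (¬(x_change = 0 ∧ y_change = 0) ∧
    ∀ s ∈ lines, (lines.headD "").toList.length ≤ s.toList.length))
instance (x_change : Int) (y_change : Int) (x : Int) (y : Int) (lines : List String) : Decidable (Pre_occupied_seat_found x_change y_change x y lines) := by unfold Pre_occupied_seat_found; infer_instance

def pvWitness_occupied_seat_found : Int × Int × Int × Int × List String := (0, 1, 0, 0, [".#."])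

def Spec_occupied_seat_found (x_change : Int) (y_change : Int) (x : Int) (y : Int) (lines : List String) (out : Bool) : Prop := out = occupied_seat_found_alt x_change y_change x y lines
instance (x_change : Int) (y_change : Int) (x : Int) (y : Int) (lines : List String) (out : Bool) : Decidable (Spec_occupied_seat_found x_change y_change x y lines out) := by unfold Spec_occupied_seat_found; infer_instance

-- ===== CLAIM (what is proved, stated in full; the proofs are below) =====
def Claim_equal_occupied_seat_found : Prop := ∀ (x_change : Int) (y_change : Int) (x : Int) (y : Int) (lines : List String), Dom_occupied_seat_found x_change y_change x y lines → Pre_occupied_seat_found x_change y_change x y lines → Spec_occupied_seat_found x_change y_change x y lines (occupied_seat_found x_change y_change x y lines)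


-- ===== LEMMAS AND PROOFS =====

theorem pvFloordiv_sub_one {t q : Int} (hq : 0 < q) :
    PySem.Int.floordiv (t - q) q = PySem.Int.floordiv t q - 1 := by
  rw [PySem.Int.floordiv_eq_ediv_of_pos hq, PySem.Int.floordiv_eq_ediv_of_pos hq]
  have h := Int.add_mul_ediv_right t (-1) (ne_of_gt hq)
  rw [show t + -1 * q = t - q by ring] at h
  omega

theorem pvMem_raySteps {dx dy n m a b k : Int} :
    k ∈ raySteps dx dy n m a b ↔
      (0 < dx ∧ k = PySem.Int.floordiv (n - 1 - a) dx) ∨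
      (dx < 0 ∧ k = PySem.Int.floordiv a (-dx)) ∨
      (0 < dy ∧ k = PySem.Int.floordiv (m - 1 - b) dy) ∨
      (dy < 0 ∧ k = PySem.Int.floordiv b (-dy)) := by
  unfold raySteps
  split_ifs with h1 h2 h3 h4 h5 h6 <;> simp_all <;>
    (repeat' constructor) <;> intro h <;> omega

theorem pvRaySteps_ne_nil {dx dy n m a b : Int} (hstep : ¬(dx = 0 ∧ dy = 0)) :
    raySteps dx dy n m a b ≠ [] := by
  unfold raySteps
  split_ifs <;> simp_all <;> omega

theorem pvRaySteps_shift {dx dy n m a b : Int} :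
    raySteps dx dy n m (a + dx) (b + dy) = (raySteps dx dy n m a b).map (fun k => k - 1) := by
  unfold raySteps
  split_ifs with h1 h2 h3 h4 h5 h6 <;> simp <;> (repeat' constructor) <;>
    first
      | (rw [show n - 1 - (a + dx) = (n - 1 - a) - dx by ring]; exact pvFloordiv_sub_one (by omega))
      | (rw [show a + dx = a - (-dx) by ring]; exact pvFloordiv_sub_one (by omega))
      | (rw [show m - 1 - (b + dy) = (m - 1 - b) - dy by ring]; exact pvFloordiv_sub_one (by omega))
      | (rw [show b + dy = b - (-dy) by ring]; exact pvFloordiv_sub_one (by omega))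

theorem pvMin?_map_sub_one (l : List Int) :
    PySem.List.min? (l.map (fun k => k - 1)) (fun k => k) =
      (PySem.List.min? l (fun k => k)).map (fun k => k - 1) := by
  cases l with
  | nil => rfl
  | cons x t =>
    rw [List.map_cons, PySem.List.min?_id_cons, PySem.List.min?_id_cons]
    simp only [Option.map_some]
    congr 1
    induction t generalizing x with
    | nil => rfl
    | cons y t ih =>
      simp only [List.map_cons, List.foldl_cons]
      rw [min_sub_sub_right, ih]

theorem pvRayK_nonneg {dx dy n m a b K : Int}
    (han : a < n) (hb0 : 0 ≤ b) (hbm : b < m) (ha0 : 0 ≤ a)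
    (hmin : PySem.List.min? (raySteps dx dy n m a b) (fun k => k) = some K) : 0 ≤ K := by
  have hK := PySem.List.min?_mem hmin
  rw [pvMem_raySteps] at hK
  rcases hK with ⟨h, rfl⟩ | ⟨h, rfl⟩ | ⟨h, rfl⟩ | ⟨h, rfl⟩ <;>
    [ exact (PySem.Int.le_floordiv_iff_mul_le h).mpr (by omega);
      exact (PySem.Int.le_floordiv_iff_mul_le (by omega)).mpr (by omega);
      exact (PySem.Int.le_floordiv_iff_mul_le h).mpr (by omega);
      exact (PySem.Int.le_floordiv_iff_mul_le (by omega)).mpr (by omega) ]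

theorem pvRayK_le {dx dy n m a b K : Int}
    (han : a < n) (hb0 : 0 ≤ b) (hbm : b < m) (ha0 : 0 ≤ a)
    (hmin : PySem.List.min? (raySteps dx dy n m a b) (fun k => k) = some K) : K ≤ n + m := by
  have hK := PySem.List.min?_mem hmin
  rw [pvMem_raySteps] at hK
  rcases hK with ⟨h, rfl⟩ | ⟨h, rfl⟩ | ⟨h, rfl⟩ | ⟨h, rfl⟩ <;>
    rw [PySem.Int.floordiv_eq_ediv_of_pos (by omega)] <;>
    [ (have := Int.ediv_le_self dx (show (0:Int) ≤ n - 1 - a by omega); omega);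
      (have := Int.ediv_le_self (-dx) ha0; omega);
      (have := Int.ediv_le_self dy (show (0:Int) ≤ m - 1 - b by omega); omega);
      (have := Int.ediv_le_self (-dy) hb0; omega) ]

theorem pvRayK_pos_iff {dx dy n m a b K : Int}
    (han : a < n) (hb0 : 0 ≤ b) (hbm : b < m) (ha0 : 0 ≤ a)
    (hmin : PySem.List.min? (raySteps dx dy n m a b) (fun k => k) = some K) :
    (b + dy < m ∧ 0 ≤ b + dy ∧ a + dx < n ∧ 0 ≤ a + dx) ↔ 1 ≤ K := by
  constructor
  · intro hbd
    have hK := PySem.List.min?_mem hmin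
    rw [pvMem_raySteps] at hK
    rcases hK with ⟨h, rfl⟩ | ⟨h, rfl⟩ | ⟨h, rfl⟩ | ⟨h, rfl⟩ <;>
      [ exact (PySem.Int.le_floordiv_iff_mul_le h).mpr (by omega);
        exact (PySem.Int.le_floordiv_iff_mul_le (by omega)).mpr (by omega);
        exact (PySem.Int.le_floordiv_iff_mul_le h).mpr (by omega);
        exact (PySem.Int.le_floordiv_iff_mul_le (by omega)).mpr (by omega) ]
  · intro hKpos
    have hall := PySem.List.min?_isMin hmin
    have key : ∀ k ∈ raySteps dx dy n m a b, 1 ≤ k := fun k hk => le_trans hKpos (hall k hk)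
    refine ⟨?_, ?_, ?_, ?_⟩
    · rcases lt_trichotomy 0 dy with h | h | h
      · have h2 := (PySem.Int.le_floordiv_iff_mul_le h).mp
          (key _ (pvMem_raySteps.mpr (Or.inr (Or.inr (Or.inl ⟨h, rfl⟩)))))
        omega
      · omega
      · omega
    · rcases lt_trichotomy 0 dy with h | h | h
      · omega
      · omega
      · have h2 := (PySem.Int.le_floordiv_iff_mul_le (show (0:Int) < -dy by omega)).mp
          (key _ (pvMem_raySteps.mpr (Or.inr (Or.inr (Or.inr ⟨h, rfl⟩)))))
        omega
    · rcases lt_trichotomy 0 dx with h | h | h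
      · have h2 := (PySem.Int.le_floordiv_iff_mul_le h).mp
          (key _ (pvMem_raySteps.mpr (Or.inl ⟨h, rfl⟩)))
        omega
      · omega
      · omega
    · rcases lt_trichotomy 0 dx with h | h | h
      · omega
      · omega
      · have h2 := (PySem.Int.le_floordiv_iff_mul_le (show (0:Int) < -dx by omega)).mp
          (key _ (pvMem_raySteps.mpr (Or.inr (Or.inl ⟨h, rfl⟩))))
        omega

theorem pvCell_in_box {lines : List String} {a b : Int}
    (hrows : ∀ s ∈ lines, (lines.headD "").toList.length ≤ s.toList.length)
    (ha0 : 0 ≤ a) (han : a < (lines.length : Int))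
    (hb0 : 0 ≤ b) (hbm : b < ((lines.headD "").toList.length : Int)) :
    ∃ c, pvCell lines a b = some c := by
  unfold pvCell
  rw [PySem.List.pyGet?_of_nonneg lines ha0]
  have halt : a.toNat < lines.length := by omega
  rw [List.getElem?_eq_getElem halt]
  simp only [Option.bind_some]
  have hlen : (lines.headD "").toList.length ≤ lines[a.toNat].toList.length :=
    hrows _ (List.getElem_mem halt)
  rw [show PySem.Str.pyGet? lines[a.toNat] b = PySem.List.pyGet? lines[a.toNat].toList b by
        simp [PySem.Str.pyGet?],
      PySem.List.pyGet?_of_nonneg _ hb0]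
  exact ⟨_, List.getElem?_eq_getElem (by omega)⟩

theorem pvOsfGo_succ_some {dx dy : Int} {lines : List String} {f : Nat} {a b : Int} {c : Char}
    (hc : pvCell lines a b = some c) :
    osfGo dx dy lines (f + 1) a b =
      (if c = '#' then true
       else if c = 'L' then false
       else if b + dy < ((lines.headD "").toList.length : Int) ∧ 0 ≤ b + dy ∧
               a + dx < (lines.length : Int) ∧ 0 ≤ a + dx then
         osfGo dx dy lines f (a + dx) (b + dy)
       else false) := by
  simp only [osfGo, hc]

theorem pvScanRay_succ_some {dx dy : Int} {lines : List String} {t : Nat} {a b : Int} {c : Char}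
    (hc : pvCell lines a b = some c) :
    scanRay dx dy lines (t + 1) a b =
      (if c = '#' then true
       else if c = 'L' then false
       else scanRay dx dy lines t (a + dx) (b + dy)) := by
  simp only [scanRay, hc]

theorem pvOsfGo_eq_scanRay {dx dy : Int} {lines : List String}
    (hrows : ∀ s ∈ lines, (lines.headD "").toList.length ≤ s.toList.length) :
    ∀ (N : Nat) (a b K : Int) (fuel : Nat),
      0 ≤ a → a < (lines.length : Int) →
      0 ≤ b → b < ((lines.headD "").toList.length : Int) →
      PySem.List.min? (raySteps dx dy (lines.length : Int) ((lines.headD "").toList.length : Int) a b) (fun k => k) = some K →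
      K.toNat = N → N + 1 ≤ fuel →
      osfGo dx dy lines fuel a b = scanRay dx dy lines (N + 1) a b := by
  intro N
  induction N with
  | zero =>
    intro a b K fuel ha0 han hb0 hbm hmin hKN hfuel
    obtain ⟨f, rfl⟩ : ∃ f, fuel = f + 1 := ⟨fuel - 1, by omega⟩
    obtain ⟨c, hc⟩ := pvCell_in_box hrows ha0 han hb0 hbm
    have hbd : ¬(b + dy < ((lines.headD "").toList.length : Int) ∧ 0 ≤ b + dy ∧
        a + dx < (lines.length : Int) ∧ 0 ≤ a + dx) := by
      intro h
      have h1 := (pvRayK_pos_iff han hb0 hbm ha0 hmin).mp h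
      omega
    rw [pvOsfGo_succ_some hc, pvScanRay_succ_some hc]
    by_cases h1 : c = '#'
    · rw [if_pos h1, if_pos h1]
    · by_cases h2 : c = 'L'
      · rw [if_neg h1, if_pos h2, if_neg h1, if_pos h2]
      · rw [if_neg h1, if_neg h2, if_neg hbd, if_neg h1, if_neg h2]
        rfl
  | succ N ih =>
    intro a b K fuel ha0 han hb0 hbm hmin hKN hfuel
    obtain ⟨f, rfl⟩ : ∃ f, fuel = f + 1 := ⟨fuel - 1, by omega⟩
    obtain ⟨c, hc⟩ := pvCell_in_box hrows ha0 han hb0 hbm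
    have hK1 : 1 ≤ K := by omega
    have hbd : b + dy < ((lines.headD "").toList.length : Int) ∧ 0 ≤ b + dy ∧
        a + dx < (lines.length : Int) ∧ 0 ≤ a + dx :=
      (pvRayK_pos_iff han hb0 hbm ha0 hmin).mpr hK1
    have hmin' : PySem.List.min? (raySteps dx dy (lines.length : Int)
        ((lines.headD "").toList.length : Int) (a + dx) (b + dy)) (fun k => k) = some (K - 1) := by
      rw [pvRaySteps_shift, pvMin?_map_sub_one, hmin]
      rfl
    have hrec := ih (a + dx) (b + dy) (K - 1) f hbd.2.2.2 hbd.2.2.1 hbd.2.1 hbd.1 hmin'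
      (by omega) (by omega)
    rw [pvOsfGo_succ_some hc, pvScanRay_succ_some hc]
    by_cases h1 : c = '#'
    · rw [if_pos h1, if_pos h1]
    · by_cases h2 : c = 'L'
      · rw [if_neg h1, if_pos h2, if_neg h1, if_pos h2]
      · rw [if_neg h1, if_neg h2, if_pos hbd, if_neg h1, if_neg h2]
        exact hrec

-- ===== VERDICT (by name: the statement is the Claim_ definition above) =====
theorem occupied_seat_found_spec : Claim_equal_occupied_seat_found := by
  intro dx dy x y lines _ hpre
  obtain ⟨hsome, hwalk⟩ := hpre
  unfold Spec_occupied_seat_found occupied_seat_found occupied_seat_found_alt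
  obtain ⟨c, hc⟩ : ∃ c, pvCell lines x y = some c := by
    cases h : pvCell lines x y with
    | none => rw [h] at hsome; simp at hsome
    | some c => exact ⟨c, rfl⟩
  rw [show lines.length + (lines.headD "").toList.length + 2 =
        (lines.length + (lines.headD "").toList.length + 1) + 1 from rfl,
      pvOsfGo_succ_some hc]
  simp only [hc]
  by_cases h1 : c = '#'
  · rw [if_pos h1, if_pos h1]
  · by_cases h2 : c = 'L'
    · rw [if_neg h1, if_pos h2, if_neg h1, if_pos h2]
    · rw [if_neg h1, if_neg h2, if_neg h1, if_neg h2]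
      by_cases hbd : y + dy < ((lines.headD "").toList.length : Int) ∧ 0 ≤ y + dy ∧
          x + dx < (lines.length : Int) ∧ 0 ≤ x + dx
      · obtain ⟨hstep, hrows⟩ := hwalk ⟨by simp [hc, h1], by simp [hc, h2],
          hbd.2.1, hbd.1, hbd.2.2.2, hbd.2.2.1⟩
        have hbd' : 0 ≤ y + dy ∧ y + dy < ((lines.headD "").toList.length : Int) ∧
            0 ≤ x + dx ∧ x + dx < (lines.length : Int) := ⟨hbd.2.1, hbd.1, hbd.2.2.2, hbd.2.2.1⟩
        obtain ⟨K, hK⟩ : ∃ K, PySem.List.min? (raySteps dx dy (lines.length : Int)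
            ((lines.headD "").toList.length : Int) (x + dx) (y + dy)) (fun k => k) = some K := by
          cases h : PySem.List.min? (raySteps dx dy (lines.length : Int)
              ((lines.headD "").toList.length : Int) (x + dx) (y + dy)) (fun k => k) with
          | none => exact absurd ((PySem.List.min?_eq_none_iff _ _).mp h) (pvRaySteps_ne_nil hstep)
          | some K => exact ⟨K, rfl⟩
        have hK0 : 0 ≤ K := pvRayK_nonneg hbd.2.2.1 hbd.2.1 hbd.1 hbd.2.2.2 hK
        have hKle : K ≤ (lines.length : Int) + ((lines.headD "").toList.length : Int) :=
          pvRayK_le hbd.2.2.1 hbd.2.1 hbd.1 hbd.2.2.2 hK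
        have hmain := pvOsfGo_eq_scanRay hrows K.toNat (x + dx) (y + dy) K
          (lines.length + (lines.headD "").toList.length + 1)
          hbd.2.2.2 hbd.2.2.1 hbd.2.1 hbd.1 hK rfl (by omega)
        have htn : (K + 1).toNat = K.toNat + 1 := by omega
        rw [if_pos hbd, if_pos hbd', hK]
        show _ = scanRay dx dy lines (K + 1).toNat (x + dx) (y + dy)
        rw [htn]
        exact hmain
      · have hbd' : ¬(0 ≤ y + dy ∧ y + dy < ((lines.headD "").toList.length : Int) ∧
            0 ≤ x + dx ∧ x + dx < (lines.length : Int)) := by tauto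
        rw [if_neg hbd, if_neg hbd']
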